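-- pv_equiv track=rewrite | github.com/NikolayZakharevich/itmo-ml | cf/n.py | calc_row
-- ===== SOURCE A (Python) =====
-- def calc_row(row):
--     sum = 0
--     n = len(row)
--     r = 0
--     for i in range(n - 1):
--         sum += row[i]
--         r += (2 * n - (2 * i + 2)) * row[i]
--     sum += row[n - 1]
--     return (n - 1) * sum - r
-- ===== SOURCE B (Python) =====
-- def calc_row(row):
--     res = 0
--     prefix = 0
--     for j, x in enumerate(row):
--         res += j * x - prefix
--         prefix += x
--     return res
-- ===== Notes on version B (the rewrite author's own statement) =====
-- stated objective: simpler
-- what changed: B recognizes the result as sum over pairs i<j of (row[j]-row[i]) and computes it in a single prefix-sum pass over enumerate(row), replacing A's two accumulators with index-derived coefficients (2n-2i-2) and the separate final row[n-1] access.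
import Mathlib
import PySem

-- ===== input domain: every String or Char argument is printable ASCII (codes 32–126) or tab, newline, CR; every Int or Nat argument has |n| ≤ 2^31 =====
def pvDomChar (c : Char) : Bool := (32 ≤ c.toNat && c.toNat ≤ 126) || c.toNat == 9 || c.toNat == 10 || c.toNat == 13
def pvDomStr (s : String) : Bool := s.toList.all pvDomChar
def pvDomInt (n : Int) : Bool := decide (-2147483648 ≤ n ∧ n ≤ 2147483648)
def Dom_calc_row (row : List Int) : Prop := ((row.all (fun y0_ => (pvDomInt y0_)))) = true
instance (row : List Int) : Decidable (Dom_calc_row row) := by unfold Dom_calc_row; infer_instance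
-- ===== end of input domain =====

-- B computes the same value by one prefix-sum pass over enumerate(row) instead of A's
-- two accumulators with index-derived coefficients; same O(n) cost, simpler state.

-- ===== PORT A =====
def calc_row (row : List Int) : Int :=
  let n : Int := row.length
  let st := (PySem.List.pyRange 0 (n - 1) 1).foldl
    (fun (p : Int × Int) i =>
      (p.1 + PySem.List.pyGetD row i 0,
       p.2 + (2 * n - (2 * i + 2)) * PySem.List.pyGetD row i 0)) (0, 0)
  let s := st.1 + PySem.List.pyGetD row (n - 1) 0
  (n - 1) * s - st.2

-- ===== PORT B =====
def calc_row_alt (row : List Int) : Int :=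
  ((PySem.List.enumerate row 0).foldl
    (fun (p : Int × Int) jx => (p.1 + jx.1 * jx.2 - p.2, p.2 + jx.2)) (0, 0)).1

-- ===== PRECONDITION & SPEC =====
-- Pre_ excludes only the empty list, on which A's row[n-1] (= row[-1]) raises IndexError.
def Pre_calc_row (row : List Int) : Prop := row ≠ []
instance (row : List Int) : Decidable (Pre_calc_row row) := by unfold Pre_calc_row; infer_instance
def pvWitness_calc_row : List Int := [3, -1, 4]

def Spec_calc_row (row : List Int) (out : Int) : Prop := out = calc_row_alt row
instance (row : List Int) (out : Int) : Decidable (Spec_calc_row row out) := by unfold Spec_calc_row; infer_instance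

-- ===== CLAIM (what is proved, stated in full; the proofs are below) =====
def Claim_equal_calc_row : Prop := ∀ (row : List Int), Dom_calc_row row → Pre_calc_row row → Spec_calc_row row (calc_row row)

-- ===== LEMMAS AND PROOFS =====

-- common closed form: sum over k < n of (2k+1-n) * row[k]
def pvM (l : List Int) : Int :=
  ∑ k ∈ Finset.range l.length, (2 * (k : Int) + 1 - (l.length : Int)) * l.getD k 0

-- closed form of B's res component, as a function of the start index
def pvG : List Int → Int → Int
  | [], _ => 0
  | x :: t, s => s * x + pvG t (s + 1) - (t.length : Int) * x

lemma pv_sum_getD (l : List Int) :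
    l.sum = ∑ k ∈ Finset.range l.length, l.getD k 0 := by
  induction l with
  | nil => simp
  | cons x t ih =>
    simp [List.length_cons, Finset.sum_range_succ', ih]
    ring

lemma pv_fold (l : List Int) : ∀ (s res pre : Int),
    ((PySem.List.enumerate l s).foldl
      (fun (p : Int × Int) jx => (p.1 + jx.1 * jx.2 - p.2, p.2 + jx.2)) (res, pre))
    = (res + pvG l s - (l.length : Int) * pre, pre + l.sum) := by
  induction l with
  | nil => intro s res pre; simp [PySem.List.enumerate_nil, pvG]
  | cons x t ih =>
    intro s res pre
    rw [PySem.List.enumerate_cons, List.foldl_cons, ih]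
    simp only [pvG, List.sum_cons, List.length_cons, Prod.mk.injEq]
    push_cast
    constructor <;> ring

lemma pvG_shift (l : List Int) : ∀ s : Int, pvG l (s + 1) = pvG l s + l.sum := by
  induction l with
  | nil => intro s; simp [pvG]
  | cons x t ih =>
    intro s
    simp only [pvG, List.sum_cons, ih (s + 1)]
    ring

lemma pv_alt_eq_G (l : List Int) : calc_row_alt l = pvG l 0 := by
  simp only [calc_row_alt, pv_fold]
  ring

lemma pv_alt_cons (x : Int) (t : List Int) :
    calc_row_alt (x :: t) = calc_row_alt t + t.sum - (t.length : Int) * x := by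
  rw [pv_alt_eq_G, pv_alt_eq_G]
  simp only [pvG]
  rw [show (0 : Int) + 1 = 1 by ring, show (1 : Int) = 0 + 1 by ring, pvG_shift]
  ring

lemma pvM_cons (x : Int) (t : List Int) :
    pvM (x :: t) = pvM t + t.sum - (t.length : Int) * x := by
  rw [pvM, pvM, List.length_cons, Finset.sum_range_succ', pv_sum_getD]
  simp only [List.getD_cons_succ, List.getD_cons_zero]
  push_cast
  have hc : ∀ k ∈ Finset.range t.length,
      (2 * ((k : Int) + 1) + 1 - ((t.length : Int) + 1)) * t.getD k 0
      = (2 * (k : Int) + 1 - (t.length : Int)) * t.getD k 0 + t.getD k 0 := fun k _ => by ring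
  rw [Finset.sum_congr rfl hc, Finset.sum_add_distrib]
  ring

lemma pv_alt_eq_M (l : List Int) : calc_row_alt l = pvM l := by
  induction l with
  | nil => simp [calc_row_alt, PySem.List.enumerate_nil, pvM]
  | cons x t ih => rw [pv_alt_cons, ih, pvM_cons]

lemma pv_range_sum (m : Nat) (f : Nat → Int) :
    ((List.range m).map f).sum = ∑ k ∈ Finset.range m, f k := by
  induction m with
  | zero => simp
  | succ p ih => rw [List.range_succ, Finset.sum_range_succ, ← ih]; simp

lemma pv_pyGetD_nat (l : List Int) (k : Nat) :
    PySem.List.pyGetD l (k : Int) 0 = l.getD k 0 := by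
  simp [PySem.List.pyGetD_natCast]

lemma pv_A_eq_M (l : List Int) (h : l ≠ []) : calc_row l = pvM l := by
  obtain ⟨m, hm⟩ : ∃ m, l.length = m + 1 :=
    ⟨l.length - 1, (Nat.succ_pred_eq_of_pos (List.length_pos_of_ne_nil h)).symm⟩
  simp only [calc_row]
  have hrange : PySem.List.pyRange 0 ((l.length : Int) - 1) 1
      = (List.range m).map (fun k : Nat => (k : Int)) := by
    rw [PySem.List.pyRange_one, show ((l.length : Int) - 1 - 0).toNat = m by omega]
    exact List.map_congr_left (fun k _ => by simp)
  have hsplit : ∀ (xs : List Int) (a b : Int),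
      xs.foldl (fun (p : Int × Int) i =>
        (p.1 + PySem.List.pyGetD l i 0,
         p.2 + (2 * (l.length : Int) - (2 * i + 2)) * PySem.List.pyGetD l i 0)) (a, b)
      = (a + (xs.map (fun i => PySem.List.pyGetD l i 0)).sum,
         b + (xs.map (fun i => (2 * (l.length : Int) - (2 * i + 2)) * PySem.List.pyGetD l i 0)).sum) := by
    intro xs
    induction xs with
    | nil => intro a b; simp
    | cons y t ih =>
      intro a b
      simp only [List.foldl_cons, List.map_cons, List.sum_cons, ih, Prod.mk.injEq]
      exact ⟨by ring, by ring⟩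
  have hlast : PySem.List.pyGetD l ((l.length : Int) - 1) 0 = l.getD m 0 := by
    rw [show (l.length : Int) - 1 = ((m : Nat) : Int) by omega, pv_pyGetD_nat]
  rw [hrange, hsplit, List.map_map, List.map_map, pv_range_sum, pv_range_sum]
  simp only [Function.comp_apply, pv_pyGetD_nat]
  rw [hlast, pvM, hm, Finset.sum_range_succ]
  push_cast [hm]
  have h2 : (m : Int) * (∑ k ∈ Finset.range m, l.getD k 0)
      - ∑ k ∈ Finset.range m, (2 * ((m : Int) + 1) - (2 * (k : Int) + 2)) * l.getD k 0
      = ∑ k ∈ Finset.range m, (2 * (k : Int) + 1 - ((m : Int) + 1)) * l.getD k 0 := by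
    rw [Finset.mul_sum, ← Finset.sum_sub_distrib]
    exact Finset.sum_congr rfl (fun k _ => by ring)
  linear_combination h2

-- ===== VERDICT (by name: the statement is the Claim_ definition above) =====
theorem calc_row_spec : Claim_equal_calc_row := by
  intro row _ hpre
  unfold Spec_calc_row
  rw [pv_A_eq_M row hpre, pv_alt_eq_M]
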